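-- pv_equiv track=rewrite | github.com/kylinsoong/f5-tmsh-generator | f5bigip/configParse.py | extract_snat_attributes
-- ===== SOURCE A (Python) =====
-- def trip_prefix(line, prefix):
--     if len(line) > 0 and prefix is not None and prefix in line:
--         return line.strip().lstrip(prefix).strip()
--     else:
--         return line.strip()
--
-- def extract_snat_attributes(data_all):
--
--     snatpool = None
--     snatType = None
--
--     data_lines = data_all.splitlines()
--     for data_line in data_lines:
--         line = data_line.strip()
--         if line.startswith("pool"):
--             snatpool = trip_prefix(line, "pool")
--         elif line.startswith("type"):
--             snatType = trip_prefix(line, "type")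
--
--     return (snatpool, snatType)
-- ===== SOURCE B (Python) =====
-- def trip_prefix(line, prefix):
--     if len(line) > 0 and prefix is not None and prefix in line:
--         return line.strip().lstrip(prefix).strip()
--     else:
--         return line.strip()
--
-- def extract_snat_attributes(data_all):
--     snatpool = None
--     snatType = None
--     for data_line in reversed(data_all.splitlines()):
--         line = data_line.strip()
--         if snatpool is None and line.startswith("pool"):
--             snatpool = trip_prefix(line, "pool")
--         elif snatType is None and line.startswith("type"):
--             snatType = trip_prefix(line, "type")
--         if snatpool is not None and snatType is not None:
--             break
--     return (snatpool, snatType)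
-- ===== Notes on version B (the rewrite author's own statement) =====
-- stated objective: alternative
-- what changed: B scans the reversed line list taking the FIRST match for each of 'pool'/'type' (with an early break once both are found) instead of A's forward scan where the last match overwrites.
import Mathlib
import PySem

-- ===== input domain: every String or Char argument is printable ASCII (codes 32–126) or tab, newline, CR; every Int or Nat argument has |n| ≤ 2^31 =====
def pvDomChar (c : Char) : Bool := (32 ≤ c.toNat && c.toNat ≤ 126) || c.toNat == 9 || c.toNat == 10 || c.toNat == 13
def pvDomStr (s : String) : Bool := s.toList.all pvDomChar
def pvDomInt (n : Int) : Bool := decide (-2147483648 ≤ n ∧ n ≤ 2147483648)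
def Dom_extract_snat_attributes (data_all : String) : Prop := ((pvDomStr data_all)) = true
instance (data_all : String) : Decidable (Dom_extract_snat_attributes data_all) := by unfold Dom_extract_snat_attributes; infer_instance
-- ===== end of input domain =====

-- B replaces A's forward last-match-wins scan by a reverse first-match scan with early exit; same result, proved equal.

-- ===== PORT A =====
-- Python str.lstrip(chars): drop leading characters belonging to the char set (exact, hand-ported)
def pvLstripChars (cs : List Char) (chars : List Char) : List Char :=
  cs.dropWhile (· ∈ chars)

-- trip_prefix: the 'prefix is not None' test is always true here (prefix is a string literal)
def trip_prefix (line prefix_ : String) : String :=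
  if PySem.Str.len line > 0 ∧ PySem.Str.isIn prefix_ line = true then
    String.ofList (PySem.Chars.strip (pvLstripChars (PySem.Chars.strip line.toList) prefix_.toList))
  else
    PySem.Str.strip line

def aStep (st : Option String × Option String) (data_line : String) : Option String × Option String :=
  let line := PySem.Str.strip data_line
  if PySem.Str.startswith line "pool" = true then (some (trip_prefix line "pool"), st.2)
  else if PySem.Str.startswith line "type" = true then (st.1, some (trip_prefix line "type"))
  else st

def extract_snat_attributes (data_all : String) : Option String × Option String :=
  (PySem.Str.splitlines data_all).foldl aStep (none, none)

-- ===== PORT B =====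
def bLoop : List String → Option String → Option String → Option String × Option String
  | [], snatpool, snatType => (snatpool, snatType)
  | data_line :: rest, snatpool, snatType =>
    let line := PySem.Str.strip data_line
    let st :=
      if snatpool = none ∧ PySem.Str.startswith line "pool" = true then
        (some (trip_prefix line "pool"), snatType)
      else if snatType = none ∧ PySem.Str.startswith line "type" = true then
        (snatpool, some (trip_prefix line "type"))
      else (snatpool, snatType)
    if st.1 ≠ none ∧ st.2 ≠ none then st else bLoop rest st.1 st.2

def extract_snat_attributes_alt (data_all : String) : Option String × Option String :=
  bLoop (PySem.Str.splitlines data_all).reverse none none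

-- ===== PRECONDITION & SPEC =====
def Spec_extract_snat_attributes (data_all : String) (out : Option String × Option String) : Prop := out = extract_snat_attributes_alt data_all
instance (data_all : String) (out : Option String × Option String) : Decidable (Spec_extract_snat_attributes data_all out) := by unfold Spec_extract_snat_attributes; infer_instance

-- ===== CLAIM (what is proved, stated in full; the proofs are below) =====
def Claim_equal_extract_snat_attributes : Prop := ∀ (data_all : String), Dom_extract_snat_attributes data_all → Spec_extract_snat_attributes data_all (extract_snat_attributes data_all)

-- ===== LEMMAS AND PROOFS =====

-- "first some else fallback"
def ov (o p : Option String) : Option String :=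
  match o with
  | some v => some v
  | none => p

-- the value a matching line contributes, or none
def poolVal (data_line : String) : Option String :=
  let line := PySem.Str.strip data_line
  if PySem.Str.startswith line "pool" = true then some (trip_prefix line "pool") else none

def typeVal (data_line : String) : Option String :=
  let line := PySem.Str.strip data_line
  if PySem.Str.startswith line "type" = true then some (trip_prefix line "type") else none

-- first some value of f over the list
def firstV (f : String → Option String) : List String → Option String
  | [] => none
  | l :: r => ov (f l) (firstV f r)

-- break-free version of bLoop
def bNB : List String → Option String → Option String → Option String × Option String
  | [], snatpool, snatType => (snatpool, snatType)
  | data_line :: rest, snatpool, snatType =>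
    let line := PySem.Str.strip data_line
    let st :=
      if snatpool = none ∧ PySem.Str.startswith line "pool" = true then
        (some (trip_prefix line "pool"), snatType)
      else if snatType = none ∧ PySem.Str.startswith line "type" = true then
        (snatpool, some (trip_prefix line "type"))
      else (snatpool, snatType)
    bNB rest st.1 st.2

theorem ov_ov (a b c : Option String) : ov (ov a b) c = ov a (ov b c) := by
  cases a <;> cases b <;> rfl

theorem ov_none_right (a : Option String) : ov a none = a := by cases a <;> rfl

theorem not_both_prefix (line : String) :
    PySem.Str.startswith line "pool" = true → PySem.Str.startswith line "type" = false := by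
  intro h
  by_contra hne
  have ht : PySem.Str.startswith line "type" = true := by
    cases hh : PySem.Str.startswith line "type" with
    | true => rfl
    | false => exact absurd hh hne
  have hp := (PySem.Chars.startswith_iff _ _).1 (by simpa using h)
  have ht' := (PySem.Chars.startswith_iff _ _).1 (by simpa using ht)
  have hlen : ("pool".toList).length = ("type".toList).length := by decide
  have := List.prefix_of_prefix_length_le hp ht' (le_of_eq hlen)
  have heq : ("pool".toList) = ("type".toList) := this.eq_of_length hlen
  exact absurd heq (by decide)

theorem firstV_append (f : String → Option String) (xs ys : List String) :
    firstV f (xs ++ ys) = ov (firstV f xs) (firstV f ys) := by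
  induction xs with
  | nil => rfl
  | cons l r ih => simp [firstV, ih, ov_ov]

theorem aStep_eq (st : Option String × Option String) (l : String) :
    aStep st l = (ov (poolVal l) st.1, ov (typeVal l) st.2) := by
  obtain ⟨a, b⟩ := st
  unfold aStep poolVal typeVal
  dsimp only
  split_ifs <;>
    first
      | rfl
      | (rename_i hp ht
         have h3 := not_both_prefix _ hp
         simp_all)

theorem foldA_eq (ls : List String) (p t : Option String) :
    ls.foldl aStep (p, t) = (ov (firstV poolVal ls.reverse) p, ov (firstV typeVal ls.reverse) t) := by
  induction ls generalizing p t with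
  | nil => simp [firstV, ov]
  | cons l r ih =>
    rw [List.foldl_cons, ih]
    rw [aStep_eq]
    simp only [List.reverse_cons, firstV_append]
    simp [firstV, ov_ov, ov_none_right]

theorem bNB_eq (rs : List String) (p t : Option String) :
    bNB rs p t = (ov p (firstV poolVal rs), ov t (firstV typeVal rs)) := by
  induction rs generalizing p t with
  | nil => simp [bNB, firstV, ov_none_right]
  | cons l r ih =>
    show bNB (l :: r) p t = _
    unfold bNB
    simp only [firstV]
    split_ifs with h1 h2
    · obtain ⟨hp, hs⟩ := h1
      have hns := not_both_prefix _ hs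
      rw [ih]
      simp_all [poolVal, typeVal, ov]
    · obtain ⟨ht, hs⟩ := h2
      have hnp : PySem.Str.startswith (PySem.Str.strip l) "pool" = false := by
        by_contra hne
        have hpp : PySem.Str.startswith (PySem.Str.strip l) "pool" = true := by
          cases hh : PySem.Str.startswith (PySem.Str.strip l) "pool" with
          | true => rfl
          | false => exact absurd hh hne
        rw [not_both_prefix _ hpp] at hs
        exact Bool.false_ne_true hs
      rw [ih]
      simp_all [poolVal, typeVal, ov]
    · rw [ih]
      rcases hp : p with _ | vp <;> rcases ht : t with _ | vt <;>
        simp_all [poolVal, typeVal, ov]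

theorem ov_of_ne (a b : Option String) (h : a ≠ none) : ov a b = a := by
  cases a
  · exact absurd rfl h
  · rfl

theorem bLoop_eq_bNB (rs : List String) (p t : Option String) :
    bLoop rs p t = bNB rs p t := by
  induction rs generalizing p t with
  | nil => rfl
  | cons l r ih =>
    show bLoop (l :: r) p t = bNB (l :: r) p t
    unfold bLoop bNB
    dsimp only
    split_ifs <;>
      first
        | exact ih _ _
        | (rename_i hbr
           rw [bNB_eq, ov_of_ne _ _ hbr.1, ov_of_ne _ _ hbr.2])

-- ===== VERDICT (by name: the statement is the Claim_ definition above) =====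
theorem extract_snat_attributes_spec : Claim_equal_extract_snat_attributes := by
  intro data_all _
  unfold Spec_extract_snat_attributes extract_snat_attributes extract_snat_attributes_alt
  rw [foldA_eq, bLoop_eq_bNB, bNB_eq, ov_none_right, ov_none_right]
  rfl
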